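-- pv_equiv track=rewrite | github.com/yogthos/text-style-transfer | sentence_validator.py | _openers_are_similar
-- ===== SOURCE A (Python) =====
-- def _openers_are_similar(opener1: str, opener2: str) -> bool:
--     """Check if two opener types are similar enough to be acceptable."""
--     # Group similar openers
--     contrastive = {'conjunction', 'adverb'}  # Both can be contrastive
--     declarative = {'noun', 'det_noun', 'pronoun'}  # All declarative
--     descriptive = {'prep_phrase', 'verb_ing'}  # Both descriptive
--
--     if opener1 == opener2:
--         return True
--
--     # Check if both are in same group
--     for group in [contrastive, declarative, descriptive]:
--         if opener1 in group and opener2 in group: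
--             return True
--
--     return False
-- ===== SOURCE B (Python) =====
-- # Precomputed symmetric relation: the set of all ordered pairs of similar openers.
-- _SIMILAR_PAIRS = frozenset(
--     (a, b)
--     for group in (('conjunction', 'adverb'),
--                   ('noun', 'det_noun', 'pronoun'),
--                   ('prep_phrase', 'verb_ing'))
--     for a in group
--     for b in group
-- )
--
-- def _openers_are_similar(opener1: str, opener2: str) -> bool:
--     """Check if two opener types are similar enough to be acceptable."""
--     return opener1 == opener2 or (opener1, opener2) in _SIMILAR_PAIRS
-- ===== Notes on version B (the rewrite author's own statement) =====
-- stated objective: idiomatic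
-- what changed: Replaces the per-call group sets and the loop testing co-membership with a module-level precomputed relation: the set of all ordered pairs of similar openers, so the check is equality or one pair-membership test.
import Mathlib
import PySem

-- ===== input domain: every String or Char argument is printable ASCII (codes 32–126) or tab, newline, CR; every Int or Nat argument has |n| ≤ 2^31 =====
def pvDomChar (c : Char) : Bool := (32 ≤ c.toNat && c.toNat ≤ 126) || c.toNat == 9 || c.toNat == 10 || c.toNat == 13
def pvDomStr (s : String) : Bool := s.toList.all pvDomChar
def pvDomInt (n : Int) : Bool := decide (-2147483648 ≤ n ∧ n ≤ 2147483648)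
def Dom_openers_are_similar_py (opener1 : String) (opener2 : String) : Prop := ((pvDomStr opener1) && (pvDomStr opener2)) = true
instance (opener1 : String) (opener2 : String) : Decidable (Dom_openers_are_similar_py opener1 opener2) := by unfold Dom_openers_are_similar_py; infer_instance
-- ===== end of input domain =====

-- B replaces A's per-call group sets and co-membership loop with one precomputed set of all similar ordered pairs (objective: idiomatic).

-- ===== PORT A =====
-- the three group sets A builds each call
def pvContrastive : PySem.Set String := PySem.Set.ofList ["conjunction", "adverb"]
def pvDeclarative : PySem.Set String := PySem.Set.ofList ["noun", "det_noun", "pronoun"]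
def pvDescriptive : PySem.Set String := PySem.Set.ofList ["prep_phrase", "verb_ing"]

-- 'for group in [...]: if opener1 in group and opener2 in group: return True' / 'return False'
def pvGroupLoopA (o1 o2 : String) : List (PySem.Set String) → Bool
  | [] => false
  | g :: rest =>
    if PySem.Set.contains g o1 && PySem.Set.contains g o2 then true
    else pvGroupLoopA o1 o2 rest

def openers_are_similar_py (opener1 : String) (opener2 : String) : Bool :=
  if opener1 == opener2 then true
  else pvGroupLoopA opener1 opener2 [pvContrastive, pvDeclarative, pvDescriptive]

-- ===== PORT B =====
-- module-level _SIMILAR_PAIRS: all ordered pairs (a, b) with a, b drawn from the same group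
def pvSimilarPairs : PySem.Set (String × String) :=
  PySem.Set.ofList
    (([["conjunction", "adverb"],
       ["noun", "det_noun", "pronoun"],
       ["prep_phrase", "verb_ing"]] : List (List String)).flatMap
      (fun group => group.flatMap (fun a => group.map (fun b => (a, b)))))

def openers_are_similar_py_alt (opener1 : String) (opener2 : String) : Bool :=
  opener1 == opener2 || PySem.Set.contains pvSimilarPairs (opener1, opener2)

-- ===== PRECONDITION & SPEC =====
def Spec_openers_are_similar_py (opener1 : String) (opener2 : String) (out : Bool) : Prop := out = openers_are_similar_py_alt opener1 opener2
instance (opener1 : String) (opener2 : String) (out : Bool) : Decidable (Spec_openers_are_similar_py opener1 opener2 out) := by unfold Spec_openers_are_similar_py; infer_instance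

-- ===== CLAIM (what is proved, stated in full; the proofs are below) =====
def Claim_equal_openers_are_similar_py : Prop := ∀ (opener1 : String) (opener2 : String), Dom_openers_are_similar_py opener1 opener2 → Spec_openers_are_similar_py opener1 opener2 (openers_are_similar_py opener1 opener2)

-- ===== LEMMAS AND PROOFS =====
-- the pair set, evaluated to its literal element list
theorem pv_pairs_lit : pvSimilarPairs =
    [("conjunction", "conjunction"), ("conjunction", "adverb"),
     ("adverb", "conjunction"), ("adverb", "adverb"),
     ("noun", "noun"), ("noun", "det_noun"), ("noun", "pronoun"),
     ("det_noun", "noun"), ("det_noun", "det_noun"), ("det_noun", "pronoun"),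
     ("pronoun", "noun"), ("pronoun", "det_noun"), ("pronoun", "pronoun"),
     ("prep_phrase", "prep_phrase"), ("prep_phrase", "verb_ing"),
     ("verb_ing", "prep_phrase"), ("verb_ing", "verb_ing")] := by decide

theorem pv_main (o1 o2 : String) :
    openers_are_similar_py o1 o2 = openers_are_similar_py_alt o1 o2 := by
  unfold openers_are_similar_py openers_are_similar_py_alt
  rw [pv_pairs_lit]
  simp only [pvGroupLoopA, pvContrastive, pvDeclarative, pvDescriptive,
    PySem.Set.ofList, PySem.Set.contains, List.contains_eq_mem, List.mem_cons,
    List.mem_singleton, List.not_mem_nil, Prod.ext_iff]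
  by_cases h : o1 = o2
  · simp [h]
  · simp only [beq_iff_eq, h, if_false]
    by_cases h1 : o1 = "conjunction" <;> by_cases h2 : o1 = "adverb" <;>
    by_cases h3 : o1 = "noun" <;> by_cases h4 : o1 = "det_noun" <;>
    by_cases h5 : o1 = "pronoun" <;> by_cases h6 : o1 = "prep_phrase" <;>
    by_cases h7 : o1 = "verb_ing" <;> simp_all

-- ===== VERDICT (by name: the statement is the Claim_ definition above) =====
theorem openers_are_similar_py_spec : Claim_equal_openers_are_similar_py := by
  intro o1 o2 _
  unfold Spec_openers_are_similar_py
  exact pv_main o1 o2
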